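-- pv_equiv track=rewrite | github.com/cloudyear/fleek-demo | goodarray.py | getQueryResult
-- ===== SOURCE A (Python) =====
-- from typing import List
--
-- def getQueryResult(N: int, queries: List[List[int]]) -> List[int]:
--     goodArr = []
--     ans = []
--     while N > 0:
--         p = 0
--         while N / 2**p >= 1:
--             p += 1
--         p -= 1
--         goodArr.insert(0, 2**p)
--         N -= goodArr[0]
--         if N == 0:
--             break
--     for q in queries:
--         l, r, m = q
--         tmp = 1
--         l -= 1
--         r -= 1
--         if l < r:
--             tmp *= goodArr[l]
--             l += 1
--         tmp *= goodArr[r]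
--         ans.append(tmp % m)
--     return ans
-- ===== SOURCE B (Python) =====
-- from typing import List
--
-- def getQueryResult(N: int, queries: List[List[int]]) -> List[int]:
--     # Build the ascending powers-of-two decomposition by one low-to-high bit scan
--     # (no nested highest-bit search, no insert(0, ...)).
--     goodArr = []
--     tmp, bit = N, 1
--     while tmp > 0:
--         if tmp % 2:
--             goodArr.append(bit)
--         tmp //= 2
--         bit *= 2
--     ans = []
--     for q in queries:
--         if q[0] < q[1]:
--             ans.append((goodArr[q[0] - 1] * goodArr[q[1] - 1]) % q[2])
--         else:
--             ans.append(goodArr[q[1] - 1] % q[2])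
--     return ans
-- ===== Notes on version B (the rewrite author's own statement) =====
-- stated objective: simpler
-- what changed: goodArr is built by a single low-to-high bit scan (append 2^i whenever bit i of N is set) instead of repeatedly searching for the highest set bit with an inner doubling loop and insert(0,...); the query loop is a direct branch instead of an accumulator with pointer bumping.
import Mathlib
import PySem

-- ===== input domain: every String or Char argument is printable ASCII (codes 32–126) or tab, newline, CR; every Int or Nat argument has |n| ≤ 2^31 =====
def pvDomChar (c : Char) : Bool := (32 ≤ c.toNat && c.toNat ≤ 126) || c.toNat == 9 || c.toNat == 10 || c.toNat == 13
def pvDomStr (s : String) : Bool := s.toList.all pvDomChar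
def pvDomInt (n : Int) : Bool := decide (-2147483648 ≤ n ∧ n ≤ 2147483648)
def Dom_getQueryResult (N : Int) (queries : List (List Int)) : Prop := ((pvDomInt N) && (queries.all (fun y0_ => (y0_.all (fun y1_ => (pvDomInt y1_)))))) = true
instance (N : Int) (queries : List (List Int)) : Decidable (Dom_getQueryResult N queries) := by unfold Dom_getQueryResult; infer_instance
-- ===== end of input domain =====

-- B builds the powers-of-two decomposition by one low-to-high bit scan instead of A's
-- repeated highest-bit search with insert(0, ...); same return value on all of Pre_.

-- ===== PORT A =====
-- inner 'while N / 2**p >= 1: p += 1' loop; the float test 'N / 2**p >= 1' is exactly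
-- '2^p ≤ N' since |N| ≤ 2^31 < 2^53 keeps float division exact on the stated domain
def pvFindP (N : Int) (p : Nat) : Nat :=
  if h : (2:Int)^p ≤ N then pvFindP N (p+1) else p
termination_by N.toNat + 1 - p
decreasing_by
  have h1 : ((p:Int)) < 2^p := by exact_mod_cast Nat.lt_two_pow_self
  omega

-- outer 'while N > 0' loop of A: find highest power, insert at front, subtract
def pvBuildA (N : Int) (goodArr : List Int) : List Int :=
  if hN : 0 < N then
    let p := pvFindP N 0 - 1
    let g := ((2:Int)^p) :: goodArr
    let N' := N - 2^p
    if N' = 0 then g else pvBuildA N' g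
  else goodArr
termination_by N.toNat
decreasing_by
  have h1 : (1:Int) ≤ 2^(pvFindP N 0 - 1) := one_le_pow₀ (by norm_num)
  omega

def getQueryResult (N : Int) (queries : List (List Int)) : List Int :=
  let goodArr := pvBuildA N []
  queries.foldl (fun ans q =>
    match q with
    | [l, r, m] =>
      let l := l - 1
      let r := r - 1
      let tmp := (1:Int)
      let s := if l < r then (tmp * PySem.List.pyGetD goodArr l 0, l + 1) else (tmp, l)
      let tmp := s.1 * PySem.List.pyGetD goodArr r 0
      ans ++ [PySem.Int.mod tmp m]
    | _ => ans ++ [0]     -- 'l, r, m = q' raises ValueError here: outside Pre_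
  ) []

-- ===== PORT B =====
-- 'while tmp > 0: if tmp % 2: append bit; tmp //= 2; bit *= 2'
def pvBuildB (tmp : Int) (bit : Int) : List Int :=
  if 0 < tmp then
    (if PySem.Int.mod tmp 2 ≠ 0 then [bit] else [])
      ++ pvBuildB (PySem.Int.floordiv tmp 2) (bit * 2)
  else []
termination_by tmp.toNat
decreasing_by
  rw [PySem.Int.floordiv_eq_ediv_of_pos (by omega)]
  omega

def getQueryResult_alt (N : Int) (queries : List (List Int)) : List Int :=
  let goodArr := pvBuildB N 1
  queries.foldl (fun ans q =>
    ans ++ [PySem.Int.mod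
      (if PySem.List.pyGetD q 0 0 < PySem.List.pyGetD q 1 0 then
        PySem.List.pyGetD goodArr (PySem.List.pyGetD q 0 0 - 1) 0 *
          PySem.List.pyGetD goodArr (PySem.List.pyGetD q 1 0 - 1) 0
      else PySem.List.pyGetD goodArr (PySem.List.pyGetD q 1 0 - 1) 0)
      (PySem.List.pyGetD q 2 0)]) []

-- ===== PRECONDITION & SPEC =====
-- Pre_ = exactly the inputs on which the Python A returns: every query is a triple [l,r,m]
-- (else ValueError), m ≠ 0 (else ZeroDivisionError), and the accessed indices r-1 (always)
-- and l-1 (when l < r) are in Python range (negative wrap allowed) of the decomposition,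
-- whose length is the bit count of max N 0 (else IndexError).
def Pre_getQueryResult (N : Int) (queries : List (List Int)) : Prop :=
  ∀ q ∈ queries, q.length = 3 ∧ q.getD 2 0 ≠ 0 ∧
    PySem.Raise.InRange (PySem.Int.bitCount (max N 0)) (q.getD 1 0 - 1) ∧
    (q.getD 0 0 < q.getD 1 0 →
      PySem.Raise.InRange (PySem.Int.bitCount (max N 0)) (q.getD 0 0 - 1))
instance (N : Int) (queries : List (List Int)) : Decidable (Pre_getQueryResult N queries) := by
  unfold Pre_getQueryResult; infer_instance

def pvWitness_getQueryResult : Int × List (List Int) := (5, [[1, 2, 7]])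

def Spec_getQueryResult (N : Int) (queries : List (List Int)) (out : List Int) : Prop := out = getQueryResult_alt N queries
instance (N : Int) (queries : List (List Int)) (out : List Int) : Decidable (Spec_getQueryResult N queries out) := by unfold Spec_getQueryResult; infer_instance

-- ===== CLAIM (what is proved, stated in full; the proofs are below) =====
def Claim_equal_getQueryResult : Prop := ∀ (N : Int) (queries : List (List Int)), Dom_getQueryResult N queries → Pre_getQueryResult N queries → Spec_getQueryResult N queries (getQueryResult N queries)

-- ===== LEMMAS AND PROOFS =====

lemma pvBuildB_nonpos (tmp bit : Int) (h : ¬ 0 < tmp) : pvBuildB tmp bit = [] := by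
  rw [pvBuildB]; simp [h]

lemma pvMod_zero_two : PySem.Int.mod 0 2 = 0 := by
  rw [PySem.Int.mod_eq_emod_of_pos (by norm_num)]; decide

lemma pvBuildB_one (b : Int) : pvBuildB 1 b = [b] := by
  rw [pvBuildB, PySem.Int.mod_eq_emod_of_pos (by norm_num),
      PySem.Int.floordiv_eq_ediv_of_pos (by norm_num)]
  norm_num
  rw [pvBuildB_nonpos _ _ (by norm_num)]

-- adding a bit strictly above all bits of t appends one element at the end
lemma pvBuildB_add_pow (k : Nat) : ∀ (t b : Int), 0 ≤ t → t < 2^k →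
    pvBuildB (t + 2^k) b = pvBuildB t b ++ [b * 2^k] := by
  induction k with
  | zero =>
    intro t b h0 h1
    have ht : t = 0 := by omega
    subst ht
    rw [pvBuildB_nonpos 0 b (by norm_num)]
    norm_num [pvBuildB_one]
  | succ k ih =>
    intro t b h0 h1
    have hpos : 0 < t + 2^(k+1) := by positivity
    have hmod : PySem.Int.mod (t + 2^(k+1)) 2 = PySem.Int.mod t 2 := by
      rw [PySem.Int.mod_eq_emod_of_pos (by norm_num),
          PySem.Int.mod_eq_emod_of_pos (by norm_num),
          show t + 2^(k+1) = t + 2^k * 2 by ring]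
      simp
    have hdiv : PySem.Int.floordiv (t + 2^(k+1)) 2 = PySem.Int.floordiv t 2 + 2^k := by
      rw [PySem.Int.floordiv_eq_ediv_of_pos (by norm_num),
          PySem.Int.floordiv_eq_ediv_of_pos (by norm_num),
          show t + 2^(k+1) = t + 2^k * 2 by ring,
          Int.add_mul_ediv_right _ _ (by norm_num)]
    have hdivlt : PySem.Int.floordiv t 2 < 2^k := by
      rw [PySem.Int.floordiv_eq_ediv_of_pos (by norm_num)]
      have : (2:Int)^(k+1) = 2^k * 2 := by ring
      omega
    have hdiv0 : 0 ≤ PySem.Int.floordiv t 2 := by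
      rw [PySem.Int.floordiv_eq_ediv_of_pos (by norm_num)]; omega
    rw [pvBuildB]
    simp only [hpos, if_true, hmod, hdiv]
    rw [ih _ _ hdiv0 hdivlt]
    by_cases ht : 0 < t
    · conv_rhs => rw [pvBuildB]
      simp only [ht, if_true]
      rw [show b * 2 * 2^k = b * 2^(k+1) by ring, List.append_assoc]
    · have ht0 : t = 0 := by omega
      subst ht0
      rw [pvBuildB_nonpos 0 b (by norm_num), pvBuildB_nonpos _ _ (by norm_num)]
      simp only [pvMod_zero_two, ne_eq, not_true_eq_false, if_false,
        List.nil_append]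
      rw [show b * 2 * 2^k = b * 2^(k+1) by ring]

-- characterization of A's inner highest-bit search
lemma pvFindP_spec (N : Int) : ∀ (p : Nat),
    N < 2^(pvFindP N p) ∧
    (2^p ≤ N → 2^(pvFindP N p - 1) ≤ N ∧ p < pvFindP N p) ∧
    (N < 2^p → pvFindP N p = p) := by
  intro p
  induction p using pvFindP.induct (N := N) with
  | case1 p h ih =>
    rw [pvFindP, dif_pos h]
    refine ⟨ih.1, fun _ => ?_, fun hlt => (not_lt.mpr h hlt).elim⟩
    by_cases h2 : (2:Int)^(p+1) ≤ N
    · exact ⟨(ih.2.1 h2).1, by have := (ih.2.1 h2).2; omega⟩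
    · have heq := ih.2.2 (by omega)
      rw [heq]; simp only [Nat.add_sub_cancel]
      exact ⟨h, by omega⟩
  | case2 p h =>
    rw [pvFindP, dif_neg h]
    exact ⟨by omega, fun h2 => absurd h2 h, fun _ => rfl⟩

-- A's outer loop equals B's bit scan (with the accumulator appended)
lemma pvBuildA_eq (n : Nat) : ∀ (N : Int), N.toNat = n → ∀ (acc : List Int),
    pvBuildA N acc = pvBuildB N 1 ++ acc := by
  induction n using Nat.strongRecOn with
  | ind n ih =>
    intro N hn acc
    rw [pvBuildA]
    by_cases hN : 0 < N
    · simp only [hN, dif_pos]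
      obtain ⟨hlt, hspec, -⟩ := pvFindP_spec N 0
      obtain ⟨hle, hpos⟩ := hspec (by norm_num; omega)
      set p := pvFindP N 0 with hp
      have hsplit : N = (N - 2^(p-1)) + 2^(p-1) := by ring
      have hlt' : N - 2^(p-1) < 2^(p-1) := by
        have : (2:Int)^p = 2^(p-1) * 2 := by
          rw [← pow_succ]; congr 1; omega
        omega
      have hB : pvBuildB N 1 = pvBuildB (N - 2^(p-1)) 1 ++ [2^(p-1)] := by
        conv_lhs => rw [hsplit]
        rw [pvBuildB_add_pow _ _ _ (by omega) hlt', one_mul]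
      by_cases h0 : N - 2^(p-1) = 0
      · simp only [h0, if_true]
        rw [hB, h0, pvBuildB_nonpos _ _ (by norm_num)]
        simp
      · simp only [h0, if_false]
        have h1 : (1:Int) ≤ 2^(p-1) := one_le_pow₀ (by norm_num)
        rw [ih (N - 2^(p-1)).toNat (by omega) _ rfl, hB, List.append_assoc]
        rfl
    · simp only [hN]
      rw [pvBuildB_nonpos _ _ hN]; rfl

-- the two query-loop bodies agree on length-3 queries once the arrays agree
lemma pvFold_eq (g : List Int) : ∀ (qs : List (List Int)), (∀ q ∈ qs, q.length = 3) →
    ∀ (ans : List Int),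
    qs.foldl (fun ans q =>
      match q with
      | [l, r, m] =>
        let l := l - 1
        let r := r - 1
        let tmp := (1:Int)
        let s := if l < r then (tmp * PySem.List.pyGetD g l 0, l + 1) else (tmp, l)
        let tmp := s.1 * PySem.List.pyGetD g r 0
        ans ++ [PySem.Int.mod tmp m]
      | _ => ans ++ [0]) ans
    = qs.foldl (fun ans q =>
      ans ++ [PySem.Int.mod
        (if PySem.List.pyGetD q 0 0 < PySem.List.pyGetD q 1 0 then
          PySem.List.pyGetD g (PySem.List.pyGetD q 0 0 - 1) 0 *
            PySem.List.pyGetD g (PySem.List.pyGetD q 1 0 - 1) 0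
        else PySem.List.pyGetD g (PySem.List.pyGetD q 1 0 - 1) 0)
        (PySem.List.pyGetD q 2 0)]) ans := by
  intro qs
  induction qs with
  | nil => intro _ ans; rfl
  | cons q qs ihq =>
    intro hlen ans
    have h3 := hlen q (List.mem_cons_self)
    have htl : ∀ q ∈ qs, q.length = 3 := fun q hq => hlen q (List.mem_cons_of_mem _ hq)
    rcases q with - | ⟨l, - | ⟨r, - | ⟨m, - | ⟨x, q⟩⟩⟩⟩ <;> simp at h3
    -- q = [l, r, m]
    simp only [List.foldl_cons]
    have e0 : PySem.List.pyGetD [l, r, m] 0 0 = l := by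
      simp [PySem.List.pyGetD, PySem.List.pyGet?, PySem.List.pyIdx?]
    have e1 : PySem.List.pyGetD [l, r, m] 1 0 = r := by
      simp [PySem.List.pyGetD, PySem.List.pyGet?, PySem.List.pyIdx?]
    have e2 : PySem.List.pyGetD [l, r, m] 2 0 = m := by
      simp [PySem.List.pyGetD, PySem.List.pyGet?, PySem.List.pyIdx?]
    rw [e0, e1, e2]
    by_cases hlr : l < r
    · rw [if_pos (show l - 1 < r - 1 by omega), if_pos hlr, one_mul]
      exact ihq htl _
    · rw [if_neg (show ¬ l - 1 < r - 1 by omega), if_neg hlr, one_mul]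
      exact ihq htl _

-- ===== VERDICT (by name: the statement is the Claim_ definition above) =====
theorem getQueryResult_spec : Claim_equal_getQueryResult := by
  intro N queries _ hpre
  unfold Spec_getQueryResult getQueryResult getQueryResult_alt
  rw [show pvBuildA N [] = pvBuildB N 1 by
        rw [pvBuildA_eq N.toNat N rfl, List.append_nil]]
  exact pvFold_eq _ _ (fun q hq => (hpre q hq).1) _
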